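-- pv_equiv track=rewrite | github.com/OfficialAnujMore/DSA_Coding_Questions | 03_Python/Companies Coding/Sankey/s3.py | s3
-- ===== SOURCE A (Python) =====
-- def s3(name,entry):
--
--     overall_sum=[]
--     for i in range(0,len(entry)):
--         # overall_sum=0
--         total = 0
--         for j in range(0,3):
--             total+= sum(entry[i][j])
--         overall_sum.append(total)
--
--
--     max_val = max(overall_sum)
--     max_index = overall_sum.index(max_val)
--     return name[max_index]
-- ===== SOURCE B (Python) =====
-- def s3(name, entry):
--     best_total = best_index = None
--     for i, row in enumerate(entry):
--         t = sum(row[0]) + sum(row[1]) + sum(row[2])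
--         if best_total is None or t > best_total:
--             best_total, best_index = t, i
--     return name[best_index]
-- ===== Notes on version B (the rewrite author's own statement) =====
-- stated objective: simpler
-- what changed: A builds a list of row totals, scans it with max(), then re-scans it with .index() to recover the position; B makes a single forward pass over enumerate(entry) maintaining a (best_total, best_index) accumulator and never materialises the totals list.
import Mathlib
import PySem

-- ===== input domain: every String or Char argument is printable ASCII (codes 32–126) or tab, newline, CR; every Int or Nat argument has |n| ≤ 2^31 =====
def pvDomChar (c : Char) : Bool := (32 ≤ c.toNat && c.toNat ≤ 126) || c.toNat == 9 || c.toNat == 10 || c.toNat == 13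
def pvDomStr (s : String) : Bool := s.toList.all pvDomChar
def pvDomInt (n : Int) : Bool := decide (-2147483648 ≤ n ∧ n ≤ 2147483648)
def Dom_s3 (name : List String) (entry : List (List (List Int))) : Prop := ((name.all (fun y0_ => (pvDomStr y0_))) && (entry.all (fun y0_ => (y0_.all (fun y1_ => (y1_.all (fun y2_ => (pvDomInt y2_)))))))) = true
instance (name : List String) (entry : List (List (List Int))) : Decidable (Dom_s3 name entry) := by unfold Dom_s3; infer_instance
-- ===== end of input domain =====

-- B replaces A's three staged passes (build the totals list, max over it, .index to re-find the position) by one forward pass keeping a (best_total, best_index) accumulator; same cost, no intermediate list.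


-- ===== PORT A =====
def s3 (name : List String) (entry : List (List (List Int))) : String :=
  let overall_sum : List Int :=
    (PySem.List.pyRange 0 (entry.length : Int) 1).foldl
      (fun acc i =>
        let total : Int := (PySem.List.pyRange 0 3 1).foldl
          (fun t j => t + (PySem.List.pyGetD (PySem.List.pyGetD entry i []) j []).sum) 0
        acc ++ [total]) []
  let max_val : Int := (PySem.List.max? overall_sum (fun v => v)).getD 0
  let max_index : Nat := (PySem.List.index? overall_sum max_val).getD 0
  PySem.List.pyGetD name (max_index : Int) ""

-- ===== PORT B =====
-- the for-loop over enumerate(entry): state = Option (best_total, best_index)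
-- (row[0]/row[1]/row[2] ported with pyGetD; exact under Pre_s3, where every row has ≥ 3 sublists)
def s3AltLoop (rows : List (List (List Int))) (i : Int) (best : Option (Int × Int)) : Option (Int × Int) :=
  match rows with
  | [] => best
  | row :: rest =>
    let t : Int := (PySem.List.pyGetD row 0 []).sum + (PySem.List.pyGetD row 1 []).sum
                   + (PySem.List.pyGetD row 2 []).sum
    let best' : Option (Int × Int) :=
      match best with
      | none => some (t, i)
      | some (bt, bi) => if bt < t then some (t, i) else some (bt, bi)
    s3AltLoop rest (i + 1) best'

def s3_alt (name : List String) (entry : List (List (List Int))) : String :=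
  match s3AltLoop entry 0 none with
  | some (_, bi) => PySem.List.pyGetD name bi ""
  | none => ""   -- empty entry: Python B raises TypeError here (outside Pre_s3)

-- ===== PRECONDITION & SPEC =====
-- total of row i of entry: the sum of its first three sublists (used only to state Pre_s3)
def pvRowT (entry : List (List (List Int))) (i : Nat) : Int :=
  (((entry.getD i []).take 3).map List.sum).sum

-- Pre_ excludes exactly the inputs on which A raises: empty entry (max() raises ValueError),
-- a row with fewer than 3 sublists (entry[i][j] raises IndexError), and inputs whose first
-- row-total argmax is ≥ len(name) (name[max_index] raises IndexError); A returns on all other inputs.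
def Pre_s3 (name : List String) (entry : List (List (List Int))) : Prop :=
  entry ≠ [] ∧ (∀ row ∈ entry, 3 ≤ row.length) ∧
  ∃ i < entry.length, i < name.length ∧
    (∀ j < entry.length, pvRowT entry j ≤ pvRowT entry i) ∧
    (∀ j < i, pvRowT entry j < pvRowT entry i)
instance (name : List String) (entry : List (List (List Int))) : Decidable (Pre_s3 name entry) := by unfold Pre_s3; infer_instance
def pvWitness_s3 : List String × List (List (List Int)) := (["a", "b"], [[[1], [2], [3]], [[4], [], [5, 6]]])
def Spec_s3 (name : List String) (entry : List (List (List Int))) (out : String) : Prop := out = s3_alt name entry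
instance (name : List String) (entry : List (List (List Int))) (out : String) : Decidable (Spec_s3 name entry out) := by unfold Spec_s3; infer_instance

-- ===== CLAIM (what is proved, stated in full; the proofs are below) =====
def Claim_equal_s3 : Prop := ∀ (name : List String) (entry : List (List (List Int))), Dom_s3 name entry → Pre_s3 name entry → Spec_s3 name entry (s3 name entry)

-- ===== LEMMAS AND PROOFS =====

-- the key value of row i, as both programs compute it
def pvKey (entry : List (List (List Int))) (i : Int) : Int :=
  ((PySem.List.pyRange 0 3 1).map
    (fun j => (PySem.List.pyGetD (PySem.List.pyGetD entry i []) j []).sum)).sum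

-- the running-max step on values is `max`
theorem pvStep_eq_max (m v : Int) : (if m < v then v else m) = max m v := by
  split <;> omega

-- the seed is ≤ the running-max fold
theorem pvSeed_le_fold (l : List Int) (m : Int) :
    m ≤ l.foldl (fun m v => if m < v then v else m) m := by
  have h : l.foldl (fun m v => if m < v then v else m) m = l.foldl max m := by
    induction l generalizing m with
    | nil => rfl
    | cons y t ih =>
      rw [List.foldl_cons, List.foldl_cons, pvStep_eq_max]
      exact ih (max m y)
  rw [h]
  exact (PySem.List.le_foldl_max l m).1

-- the running fold on elements, tracking the best element so far
def pvRun (key : Int → Int) (x : Int) (t : List Int) : Int :=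
  t.foldl (fun m v => if key m < key v then v else m) x

theorem pvMax?_cons (key : Int → Int) (x : Int) (t : List Int) :
    PySem.List.max? (x :: t) key = some (pvRun key x t) := by
  have aux : ∀ (f : Option Int → Int → Option Int),
      (∀ m v, f (some m) v = if key m < key v then some v else some m) →
      ∀ (t : List Int) (x : Int), t.foldl f (some x) = some (pvRun key x t) := by
    intro f hf t
    induction t with
    | nil => intro x; simp [pvRun]
    | cons y t ih =>
      intro x
      rw [List.foldl_cons, hf]
      by_cases h : key x < key y
      · rw [if_pos h, ih y]
        simp [pvRun, List.foldl, h]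
      · rw [if_neg h, ih x]
        simp [pvRun, List.foldl, h]
  unfold PySem.List.max?
  rw [List.foldl_cons]
  show List.foldl _ (some x) t = some (pvRun key x t)
  exact aux _ (fun m v => rfl) t x

-- first index of the max of the key-values = position of the first-max element
theorem pvArgmax (key : Int → Int) :
    ∀ (t : List Int) (x : Int),
      ∃ k : Nat, k ≤ t.length ∧
        PySem.List.index? (key x :: t.map key)
          ((t.map key).foldl (fun m v => if m < v then v else m) (key x)) = some k ∧
        pvRun key x t = (x :: t).getD k 0 := by
  intro t
  induction t with
  | nil =>
    intro x
    exact ⟨0, by simp, by simp, by simp [pvRun]⟩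
  | cons y t ih =>
    intro x
    by_cases hxy : key x < key y
    · -- new element y strictly beats x: x can never be the answer
      obtain ⟨k', hk', hidx', hrun'⟩ := ih y
      have hM : ((y :: t).map key).foldl (fun m v => if m < v then v else m) (key x)
          = (t.map key).foldl (fun m v => if m < v then v else m) (key y) := by
        simp [hxy]
      have hxneM : key x ≠ (t.map key).foldl (fun m v => if m < v then v else m) (key y) := by
        have h1 := pvSeed_le_fold (t.map key) (key y)
        omega
      refine ⟨k' + 1, by simpa using Nat.succ_le_succ hk', ?_, ?_⟩
      · rw [hM]
        simp only [List.map_cons]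
        rw [PySem.List.index?_cons_of_ne _ hxneM, hidx']
        rfl
      · have h2 : pvRun key x (y :: t) = pvRun key y t := by
          simp [pvRun, hxy]
        rw [h2, hrun']
        rfl
    · -- x survives against y
      obtain ⟨k', hk', hidx', hrun'⟩ := ih x
      have hM : ((y :: t).map key).foldl (fun m v => if m < v then v else m) (key x)
          = (t.map key).foldl (fun m v => if m < v then v else m) (key x) := by
        simp [hxy]
      have hrunc : pvRun key x (y :: t) = pvRun key x t := by
        simp [pvRun, hxy]
      set M := (t.map key).foldl (fun m v => if m < v then v else m) (key x) with hMdef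
      cases k' with
      | zero =>
        -- the head key x itself is the max
        have hxM : key x = M := by
          rcases (PySem.List.index?_eq_some_iff (key x :: t.map key) M 0).1 hidx' with ⟨pre, suf, heq, hlen, -⟩
          have hp : pre = [] := List.eq_nil_of_length_eq_zero hlen
          subst hp
          simpa using congrArg (fun l => l.headI) heq
        refine ⟨0, by simp, ?_, ?_⟩
        · rw [hM, ← hxM]
          exact PySem.List.index?_cons_self _ _
        · simpa [hrunc] using hrun'
      | succ k'' =>
        -- the head key x is not the max; neither is key y (≤ key x)
        have hxne : key x ≠ M := by
          intro h
          rw [h] at hidx'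
          rw [PySem.List.index?_cons_self] at hidx'
          simp at hidx'
        have hyne : key y ≠ M := by
          have h1 := pvSeed_le_fold (t.map key) (key x)
          rw [← hMdef] at h1
          omega
        have htail : PySem.List.index? (t.map key) M = some k'' := by
          rw [PySem.List.index?_cons_of_ne _ hxne] at hidx'
          cases h : PySem.List.index? (t.map key) M with
          | none => rw [h] at hidx'; simp at hidx'
          | some m =>
            rw [h] at hidx'
            simp only [Option.map_some, Option.some.injEq] at hidx'
            exact congrArg some (by omega)
        refine ⟨k'' + 2, ?_, ?_, ?_⟩
        · have h3 : k'' + 1 ≤ t.length := hk'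
          simpa using Nat.succ_le_succ h3
        · rw [hM]
          simp only [List.map_cons]
          rw [PySem.List.index?_cons_of_ne _ hxne,
            PySem.List.index?_cons_of_ne _ hyne, htail]
          rfl
        · rw [hrunc, hrun']
          rfl

-- pyRange 0 n 1 indexed at k < n is k
theorem pvRange_getD (n k : Nat) (hk : k < n) :
    (PySem.List.pyRange 0 (n : Int) 1).getD k 0 = (k : Int) := by
  have hlen : (PySem.List.pyRange 0 (n : Int) 1).length = n := by
    simp [PySem.List.length_pyRange_one]
  have hk' : k < (PySem.List.pyRange 0 (n : Int) 1).length := by omega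
  rw [List.getD_eq_getElem _ _ hk', PySem.List.getElem_pyRange_one]
  simp

-- A's inner total loop equals the key value
theorem pvKey_eq (entry : List (List (List Int))) (i : Int) :
    (PySem.List.pyRange 0 3 1).foldl
        (fun t j => t + (PySem.List.pyGetD (PySem.List.pyGetD entry i []) j []).sum) 0
      = pvKey entry i := by
  have h3 : PySem.List.pyRange 0 3 1 = [0, 1, 2] := by decide
  unfold pvKey
  rw [h3]
  simp [List.foldl, List.map, List.sum]
  ring

-- A's overall_sum is the map of the key over the index range
theorem pvOverall_eq (entry : List (List (List Int))) :
    (PySem.List.pyRange 0 (entry.length : Int) 1).foldl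
      (fun acc i =>
        acc ++ [(PySem.List.pyRange 0 3 1).foldl
          (fun t j => t + (PySem.List.pyGetD (PySem.List.pyGetD entry i []) j []).sum) 0]) []
    = (PySem.List.pyRange 0 (entry.length : Int) 1).map (pvKey entry) := by
  rw [PySem.List.foldl_append_singleton_eq_map]
  simp only [List.nil_append]
  exact List.map_congr_left (fun i _ => pvKey_eq entry i)

-- B's per-row total is the key value of its index
theorem pvRowKey (entry : List (List (List Int))) (row : List (List Int)) (i : Int)
    (hget : PySem.List.pyGetD entry i [] = row) :
    (PySem.List.pyGetD row 0 []).sum + (PySem.List.pyGetD row 1 []).sum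
        + (PySem.List.pyGetD row 2 []).sum = pvKey entry i := by
  have h3 : PySem.List.pyRange 0 3 1 = [0, 1, 2] := by decide
  unfold pvKey
  rw [h3, hget]
  simp [List.map, List.sum]
  ring

-- B's loop, started in state (key b, b) at position n, ends in the running-best over the remaining indices
theorem pvLoop_run (entry : List (List (List Int))) :
    ∀ (rest : List (List (List Int))) (n : Nat) (b : Int),
      entry.drop n = rest →
      s3AltLoop rest (n : Int) (some (pvKey entry b, b))
        = some (pvKey entry (pvRun (pvKey entry) b (PySem.List.pyRange (n : Int) (entry.length : Int) 1)),
                pvRun (pvKey entry) b (PySem.List.pyRange (n : Int) (entry.length : Int) 1)) := by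
  intro rest
  induction rest with
  | nil =>
    intro n b hdrop
    have hn : entry.length ≤ n := by
      by_contra h
      have := List.drop_eq_nil_iff.mp hdrop
      omega
    rw [PySem.List.pyRange_one_eq_nil (by exact_mod_cast hn)]
    rfl
  | cons row rest' ih =>
    intro n b hdrop
    have hn : n < entry.length := by
      by_contra h
      rw [List.drop_eq_nil_iff.mpr (by omega)] at hdrop
      simp at hdrop
    have hrow : entry[n]? = some row := by
      have h0 : (entry.drop n)[0]? = some row := by rw [hdrop]; rfl
      rwa [List.getElem?_drop, Nat.add_zero] at h0
    have hget : PySem.List.pyGetD entry (n : Int) [] = row := by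
      rw [PySem.List.pyGetD_natCast]
      simp [List.getD, hrow]
    have hdrop' : entry.drop (n + 1) = rest' := by
      have : entry.drop (n + 1) = (entry.drop n).drop 1 := by
        rw [List.drop_drop]
      rw [this, hdrop]
      rfl
    have hrange : PySem.List.pyRange (n : Int) (entry.length : Int) 1
        = (n : Int) :: PySem.List.pyRange ((n : Int) + 1) (entry.length : Int) 1 :=
      PySem.List.pyRange_one_cons (by exact_mod_cast hn)
    rw [hrange]
    show s3AltLoop (row :: rest') (n : Int) (some (pvKey entry b, b)) = _
    unfold s3AltLoop
    simp only [pvRowKey entry row (n : Int) hget]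
    by_cases hcmp : pvKey entry b < pvKey entry (n : Int)
    · rw [if_pos hcmp]
      have := ih (n + 1) (n : Int) hdrop'
      push_cast at this ⊢
      rw [this]
      simp [pvRun, List.foldl_cons, hcmp]
    · rw [if_neg hcmp]
      have := ih (n + 1) b hdrop'
      push_cast at this ⊢
      rw [this]
      simp [pvRun, List.foldl_cons, hcmp]

-- ===== VERDICT (by name: the statement is the Claim_ definition above) =====
theorem s3_spec : Claim_equal_s3 := by
  intro name entry _ hpre
  obtain ⟨hne, -, -⟩ := hpre
  unfold Spec_s3 s3 s3_alt
  have hn : 0 < entry.length := List.length_pos_iff.mpr hne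
  set key : Int → Int := pvKey entry with hkey
  have hS : PySem.List.pyRange 0 (entry.length : Int) 1
      = 0 :: PySem.List.pyRange 1 (entry.length : Int) 1 :=
    PySem.List.pyRange_one_cons (by exact_mod_cast hn)
  set t := PySem.List.pyRange 1 (entry.length : Int) 1 with ht
  obtain ⟨k, hk, hidx, hrun⟩ := pvArgmax key t 0
  have hov := pvOverall_eq entry
  -- A side: max_val is the fold-max of the key values, max_index its first position
  have hmax : PySem.List.max? (key 0 :: t.map key) (fun v => v)
      = some ((t.map key).foldl (fun m v => if m < v then v else m) (key 0)) := by
    rw [pvMax?_cons]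
    rfl
  have hkn : k < entry.length := by
    have hlt : t.length = entry.length - 1 := by
      rw [ht, PySem.List.length_pyRange_one]
      omega
    omega
  have hbestval : pvRun key 0 t = (k : Int) := by
    rw [hrun, ← hS, pvRange_getD entry.length k hkn]
  -- B side: the loop ends at the running-best index = k
  cases hcase : entry with
  | nil => exact absurd hcase hne
  | cons e0 erest =>
    have hget0 : PySem.List.pyGetD entry 0 [] = e0 := by
      rw [hcase]; exact PySem.List.pyGetD_zero_cons _ _ _
    have hloop1 : s3AltLoop entry 0 none = s3AltLoop erest 1 (some (key 0, 0)) := by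
      conv_lhs => rw [hcase]
      show s3AltLoop erest (0 + 1)
        (some ((PySem.List.pyGetD e0 0 []).sum + (PySem.List.pyGetD e0 1 []).sum
          + (PySem.List.pyGetD e0 2 []).sum, 0)) = _
      rw [pvRowKey entry e0 0 hget0]
      norm_num
      rfl
    have hdrop1 : entry.drop 1 = erest := by rw [hcase]; rfl
    have hloop := pvLoop_run entry erest 1 0 hdrop1
    rw [← hkey] at hloop
    norm_cast at hloop
    have hB : s3AltLoop entry 0 none
        = some (key (pvRun key 0 t), pvRun key 0 t) := by
      rw [hloop1, ht]
      exact hloop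
    rw [← hcase]
    rw [hov, hS]
    simp only [List.map_cons]
    rw [hmax, hB, ← hkey]
    rw [Option.getD_some, hidx, Option.getD_some, hbestval]
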